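-- pv_equiv track=rewrite | github.com/GGBoomSiege/pythonProject | PythonShell/demo06.py | getMaxSubsequenceLen
-- ===== SOURCE A (Python) =====
-- def getMaxSubsequenceLen(arr):
--     n = len(arr)
--     result = []
--
--     for i in range(n):
--         count_less = 0
--         count_greater = 0
--
--         # Count distinct elements less than and greater than arr[i]
--         for j in range(n):
--             if arr[j] < arr[i]:
--                 count_less += 1
--             elif arr[j] > arr[i]:
--                 count_greater += 1
--
--         # Calculate the length of longest odd-length subsequence
--         min_count = min(count_less, count_greater)
--         max_odd_length = min_count * 2 + 1
--
--         result.append(max_odd_length)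
--
--     return result
-- ===== SOURCE B (Python) =====
-- def getMaxSubsequenceLen(arr):
--     n = len(arr)
--     cnt = {}
--     for x in arr:
--         cnt[x] = cnt.get(x, 0) + 1
--     less = {}
--     acc = 0
--     for v in sorted(cnt):
--         less[v] = acc
--         acc += cnt[v]
--     out = []
--     for x in arr:
--         l = less[x]
--         g = n - l - cnt[x]
--         out.append(2 * min(l, g) + 1)
--     return out
-- ===== Notes on version B (the rewrite author's own statement) =====
-- stated objective: faster
-- what changed: Replaces A's O(n^2) nested rescans (counting, for every element, all smaller and larger elements) by one counting dict plus one prefix-sum pass over the sorted distinct values, then an O(1) lookup per element.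
import Mathlib
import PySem

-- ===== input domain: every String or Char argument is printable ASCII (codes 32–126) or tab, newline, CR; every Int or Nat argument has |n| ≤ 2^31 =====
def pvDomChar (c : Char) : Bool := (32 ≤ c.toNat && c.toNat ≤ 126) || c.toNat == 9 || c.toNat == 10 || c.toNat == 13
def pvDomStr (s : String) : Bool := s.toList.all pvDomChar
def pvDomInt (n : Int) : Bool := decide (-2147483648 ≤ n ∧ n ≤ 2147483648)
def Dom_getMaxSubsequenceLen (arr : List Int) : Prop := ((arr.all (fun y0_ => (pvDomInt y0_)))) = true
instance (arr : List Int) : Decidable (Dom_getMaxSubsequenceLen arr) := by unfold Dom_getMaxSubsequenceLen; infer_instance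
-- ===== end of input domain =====

-- B replaces A's quadratic per-element rescans by one counting dict + one sorted prefix-sum pass (objective: faster, O(n^2) → O(n log n)).

-- ===== PORT A =====
def getMaxSubsequenceLen (arr : List Int) : List Int :=
  let n := PySem.List.len arr
  (PySem.List.pyRange 0 n).foldl (fun result i =>
    let counts := (PySem.List.pyRange 0 n).foldl (fun (c : Int × Int) j =>
      if PySem.List.pyGetD arr j 0 < PySem.List.pyGetD arr i 0 then (c.1 + 1, c.2)
      else if PySem.List.pyGetD arr j 0 > PySem.List.pyGetD arr i 0 then (c.1, c.2 + 1)
      else c) (0, 0)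
    result ++ [min counts.1 counts.2 * 2 + 1]) []
  -- pyGetD is exact here: every index drawn from range(n) is in range, so Python's arr[i]/arr[j] never raises

-- ===== PORT B =====
def getMaxSubsequenceLen_alt (arr : List Int) : List Int :=
  let n := PySem.List.len arr
  let cnt := arr.foldl (fun (d : PySem.Dict Int Int) x => d.insert x (d.getD x 0 + 1)) PySem.Dict.empty
  let st := (PySem.List.sorted cnt.keys (fun v => v)).foldl
    (fun (s : PySem.Dict Int Int × Int) v => (s.1.insert v s.2, s.2 + cnt.getD v 0)) (PySem.Dict.empty, 0)
  -- less[x] / cnt[x] are exact as getD: every x ∈ arr is a key of both dicts, so Python never raises KeyError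
  arr.foldl (fun out x =>
    let l := st.1.getD x 0
    let g := n - l - cnt.getD x 0
    out ++ [2 * min l g + 1]) []

-- ===== PRECONDITION & SPEC =====
def Spec_getMaxSubsequenceLen (arr : List Int) (out : List Int) : Prop := out = getMaxSubsequenceLen_alt arr
instance (arr : List Int) (out : List Int) : Decidable (Spec_getMaxSubsequenceLen arr out) := by unfold Spec_getMaxSubsequenceLen; infer_instance

-- ===== CLAIM (what is proved, stated in full; the proofs are below) =====
def Claim_equal_getMaxSubsequenceLen : Prop := ∀ (arr : List Int), Dom_getMaxSubsequenceLen arr → Spec_getMaxSubsequenceLen arr (getMaxSubsequenceLen arr)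

-- ===== LEMMAS AND PROOFS =====

-- A's inner loop over arr counts elements below and above x
lemma pair_count (l : List Int) (x : Int) (a b : Int) :
    l.foldl (fun (c : Int × Int) aj =>
      if aj < x then (c.1 + 1, c.2)
      else if aj > x then (c.1, c.2 + 1)
      else c) (a, b)
    = (a + (l.countP (fun aj => decide (aj < x)) : Int),
       b + (l.countP (fun aj => decide (x < aj)) : Int)) := by
  induction l generalizing a b with
  | nil => simp
  | cons y t ih =>
    simp only [List.foldl_cons, List.countP_cons]
    rcases lt_trichotomy y x with h | h | h
    · rw [if_pos h, ih]
      simp only [h, not_lt_of_gt h, decide_true, decide_false, if_true,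
        Prod.mk.injEq]
      constructor <;> push_cast <;> omega
    · subst h
      rw [if_neg (lt_irrefl y), if_neg (lt_irrefl y), ih]
      simp only [lt_irrefl, decide_false, Prod.mk.injEq]
      constructor <;> push_cast <;> omega
    · rw [if_neg (not_lt_of_gt h), if_pos h, ih]
      simp only [h, not_lt_of_gt h, decide_true, decide_false, if_true,
        Prod.mk.injEq]
      constructor <;> push_cast <;> omega

-- A's inner loop over range(n) is the pair count over arr
lemma inner_count (arr : List Int) (x : Int) :
    (PySem.List.pyRange 0 (PySem.List.len arr)).foldl (fun (c : Int × Int) j =>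
      if PySem.List.pyGetD arr j 0 < x then (c.1 + 1, c.2)
      else if PySem.List.pyGetD arr j 0 > x then (c.1, c.2 + 1)
      else c) (0, 0)
    = ((arr.countP (fun a => decide (a < x)) : Int),
       (arr.countP (fun a => decide (x < a)) : Int)) := by
  rw [PySem.List.foldl_pyRange_pyGetD arr 0
    (fun (c : Int × Int) aj => if aj < x then (c.1 + 1, c.2)
      else if aj > x then (c.1, c.2 + 1) else c) (0, 0) (le_refl 0)]
  simp [pair_count]

-- mapping over range(n) through arr[i] is mapping over arr
lemma map_index (arr : List Int) (f : Int → Int) :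
    (PySem.List.pyRange 0 (PySem.List.len arr)).map (fun i => f (PySem.List.pyGetD arr i 0))
    = arr.map f := by
  conv_rhs => rw [← PySem.List.map_pyGetD_pyRange_zero arr 0]
  rw [List.map_map]
  rfl

-- A's result in closed form
lemma A_norm (arr : List Int) :
    getMaxSubsequenceLen arr
    = arr.map (fun x =>
        min (arr.countP (fun a => decide (a < x)) : Int)
            (arr.countP (fun a => decide (x < a)) : Int) * 2 + 1) := by
  simp only [getMaxSubsequenceLen]
  rw [PySem.List.foldl_append_singleton_eq_map]
  simp only [inner_count, List.nil_append]
  exact map_index arr (fun x =>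
    min ((arr.countP (fun a => decide (a < x)) : Int))
        ((arr.countP (fun a => decide (x < a)) : Int)) * 2 + 1)

-- inserts at keys ≠ x leave getD x unchanged through B's prefix-sum loop
lemma fold_prefix_getD_not_mem (c : Int → Int) (t : List Int) (x : Int) (hx : x ∉ t) :
    ∀ (d : PySem.Dict Int Int) (a : Int),
    ((t.foldl (fun s v => (s.1.insert v s.2, s.2 + c v)) (d, a)).1).getD x 0 = d.getD x 0 := by
  induction t with
  | nil => intro d a; simp
  | cons v t ih =>
    intro d a
    simp only [List.foldl_cons]
    rw [ih (fun h => hx (List.mem_cons_of_mem _ h))]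
    refine PySem.Dict.getD_insert_of_ne d _ _ ?_
    rintro rfl
    exact hx (List.mem_cons_self ..)

-- B's prefix-sum loop stores, at key x, the sum of c over the keys preceding x
lemma fold_prefix_getD (c : Int → Int) (ks : List Int) (x : Int) (hnd : ks.Nodup) (hx : x ∈ ks) :
    ∀ (d : PySem.Dict Int Int) (a : Int),
    ((ks.foldl (fun s v => (s.1.insert v s.2, s.2 + c v)) (d, a)).1).getD x 0
    = a + ((ks.takeWhile (fun v => v ≠ x)).map c).sum := by
  induction ks with
  | nil => cases hx
  | cons v t ih =>
    intro d a
    simp only [List.foldl_cons]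
    by_cases hvx : v = x
    · subst hvx
      rw [fold_prefix_getD_not_mem c t v (List.nodup_cons.mp hnd).1]
      simp [PySem.Dict.getD_insert_self]
    · have hxt : x ∈ t := (List.mem_cons.mp hx).resolve_left (fun h => hvx h.symm)
      rw [ih (List.Nodup.of_cons hnd) hxt]
      simp [hvx]
      omega

-- in a strictly increasing list containing x, the prefix before x is the set of elements < x
lemma takeWhile_eq_filter_lt (ks : List Int) (x : Int)
    (hs : ks.Pairwise (· < ·)) (hx : x ∈ ks) :
    ks.takeWhile (fun v => v ≠ x) = ks.filter (fun v => decide (v < x)) := by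
  induction ks with
  | nil => cases hx
  | cons v t ih =>
    by_cases hvx : v = x
    · subst hvx
      rw [List.takeWhile_cons_of_neg (by simp)]
      have hgt : ∀ y ∈ t, v < y := (List.pairwise_cons.mp hs).1
      rw [List.filter_cons_of_neg (by simp)]
      symm
      rw [List.filter_eq_nil_iff]
      intro y hy
      simp only [decide_eq_true_eq]
      exact fun h => absurd h (not_lt_of_gt (hgt y hy))
    · have hxt : x ∈ t := (List.mem_cons.mp hx).resolve_left (fun h => hvx h.symm)
      have hvlt : v < x := (List.pairwise_cons.mp hs).1 x hxt
      rw [List.takeWhile_cons_of_pos (by simp [hvx]), List.filter_cons_of_pos (by simp [hvlt])]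
      rw [ih (List.Pairwise.of_cons hs) hxt]

-- summing per-value multiplicities of arr over a deduplicated filtered key list is countP
lemma sum_counts_eq_countP (p : Int → Bool) (ks : List Int) (hnd : ks.Nodup) :
    ∀ (arr : List Int), (∀ a ∈ arr, p a = true → a ∈ ks) →
    ((ks.filter p).map (fun v => (arr.count v : Int))).sum = (arr.countP p : Int) := by
  intro arr
  induction arr with
  | nil => intro _; simp
  | cons a rest ih =>
    intro hmem
    have hrest := ih (fun b hb => hmem b (List.mem_cons_of_mem _ hb))
    simp only [List.count_cons, List.countP_cons]
    have hsplit : ((ks.filter p).map (fun v => ((rest.count v + if a == v then 1 else 0 : Nat) : Int))).sum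
        = ((ks.filter p).map (fun v => (rest.count v : Int))).sum
          + ((ks.filter p).map (fun v => if v = a then (1 : Int) else 0)).sum := by
      rw [← List.sum_map_add]
      apply congrArg
      apply List.map_congr_left
      intro v _
      by_cases h : v = a
      · subst h; simp
      · have h' : ¬ a = v := fun e => h e.symm
        simp [h, h']
    have hind : ∀ l : List Int, (l.map (fun v => if v = a then (1 : Int) else 0)).sum = (l.count a : Int) := by
      intro l
      induction l with
      | nil => simp
      | cons w ws ihw =>
        simp only [List.map_cons, List.sum_cons, List.count_cons, ihw]
        by_cases h : w = a
        · subst h; simp; omega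
        · simp [h]
    by_cases hpa : p a = true
    · have hmemf : a ∈ ks.filter p := List.mem_filter.mpr ⟨hmem a List.mem_cons_self hpa, hpa⟩
      rw [hsplit, hrest, hind, List.count_eq_one_of_mem (List.Nodup.filter p hnd) hmemf]
      simp [hpa]
    · have hnm : a ∉ ks.filter p := fun h => hpa (List.mem_filter.mp h).2
      rw [hsplit, hrest, hind, List.count_eq_zero_of_not_mem hnm]
      simp [hpa]

-- every element is below, equal to, or above x
lemma length_partition (arr : List Int) (x : Int) :
    (arr.countP (fun a => decide (a < x)) : Int) + arr.count x
      + (arr.countP (fun a => decide (x < a)) : Int) = arr.length := by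
  induction arr with
  | nil => simp
  | cons a t ih =>
    simp only [List.countP_cons, List.count_cons, List.length_cons]
    rcases lt_trichotomy a x with h | h | h
    · simp only [h, not_lt_of_gt h, decide_true, decide_false, if_true, beq_iff_eq]
      push_cast; omega
    · subst h
      simp only [lt_irrefl, decide_false, beq_self_eq_true, if_true]
      push_cast; omega
    · simp only [h, not_lt_of_gt h, decide_true, decide_false, if_true, beq_iff_eq]
      push_cast; omega

-- B's result in closed form
lemma B_norm (arr : List Int) :
    getMaxSubsequenceLen_alt arr
    = arr.map (fun x =>
        min (arr.countP (fun a => decide (a < x)) : Int)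
            (arr.countP (fun a => decide (x < a)) : Int) * 2 + 1) := by
  simp only [getMaxSubsequenceLen_alt]
  rw [PySem.List.foldl_append_singleton_eq_map]
  simp only [List.nil_append]
  apply List.map_congr_left
  intro x hx
  -- counts dict
  have hcnt : ∀ v, (arr.foldl (fun (d : PySem.Dict Int Int) x => d.insert x (d.getD x 0 + 1))
      PySem.Dict.empty).getD v 0 = (arr.count v : Int) := by
    intro v
    rw [PySem.Dict.getD_foldl_insert_add_one]
    simp [PySem.Dict.getD_empty]
  -- its key list
  have hkeys : (arr.foldl (fun (d : PySem.Dict Int Int) x => d.insert x (d.getD x 0 + 1))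
      PySem.Dict.empty).keys = PySem.Set.ofList arr := by
    rw [PySem.Dict.keys_foldl_insert]
    simp [PySem.Dict.keys_empty, PySem.Set.update_nil_left]
  rw [hkeys]
  set ks := PySem.List.sorted (PySem.Set.ofList arr) (fun v => v) with hks
  have hperm : ks.Perm (PySem.Set.ofList arr) := PySem.List.sorted_perm _ _ _
  have hnd : ks.Nodup := hperm.nodup_iff.mpr (PySem.Set.nodup_ofList arr)
  have hmemks : ∀ y, y ∈ ks ↔ y ∈ arr := by
    intro y; rw [hperm.mem_iff, PySem.Set.mem_ofList]
  have hsort : ks.Pairwise (· < ·) := PySem.List.sorted_ofList_pairwise_lt arr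
  have hxks : x ∈ ks := (hmemks x).mpr hx
  rw [fold_prefix_getD _ ks x hnd hxks,
      takeWhile_eq_filter_lt ks x hsort hxks]
  have hmapc : (ks.filter (fun v => decide (v < x))).map
        (fun v => (arr.foldl (fun (d : PySem.Dict Int Int) x => d.insert x (d.getD x 0 + 1))
          PySem.Dict.empty).getD v 0)
      = (ks.filter (fun v => decide (v < x))).map (fun v => (arr.count v : Int)) := by
    apply List.map_congr_left; intro v _; exact hcnt v
  rw [hmapc, sum_counts_eq_countP _ ks hnd arr
      (fun a ha hpa => (hmemks a).mpr ha), hcnt x]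
  have hpart := length_partition arr x
  have hlen : PySem.List.len arr = (arr.length : Int) := rfl
  simp only [hlen, zero_add]
  omega

-- ===== VERDICT (by name: the statement is the Claim_ definition above) =====
theorem getMaxSubsequenceLen_spec : Claim_equal_getMaxSubsequenceLen := by
  intro arr _
  unfold Spec_getMaxSubsequenceLen
  rw [A_norm, B_norm]
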